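-- pv_equiv track=rewrite | github.com/neilzhangpro/Maestro | src/maestro/learning/flow_distiller.py | _prune_subpatterns
-- ===== SOURCE A (Python) =====
-- def _prune_subpatterns(
--     frequent: list[tuple[tuple[str, ...], int]],
-- ) -> list[tuple[tuple[str, ...], int]]:
--     """Remove N-grams that are sub-sequences of a longer, equally-frequent N-gram."""
--     result: list[tuple[tuple[str, ...], int]] = []
--     ngram_set = {ng for ng, _ in frequent}
--     counts = dict(frequent)
--
--     for ngram, count in frequent:
--         dominated = False
--         # Check if any longer ngram containing this one has count >= count
--         for other in ngram_set:
--             if len(other) <= len(ngram):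
--                 continue
--             if count <= counts[other] and _is_subsequence(ngram, other):
--                 dominated = True
--                 break
--         if not dominated:
--             result.append((ngram, count))
--
--     return result
--
-- def _is_subsequence(short: tuple, long: tuple) -> bool:
--     """Return True if *short* appears as a contiguous sub-sequence of *long*."""
--     ls, ll = len(short), len(long)
--     for i in range(ll - ls + 1):
--         if long[i: i + ls] == short:
--             return True
--     return False
-- ===== SOURCE B (Python) =====
-- def _prune_subpatterns(
--     frequent: list[tuple[tuple[str, ...], int]],
-- ) -> list[tuple[tuple[str, ...], int]]:
--     """Remove N-grams that are sub-sequences of a longer, equally-frequent N-gram."""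
--     counts = dict(frequent)
--     lengths = {len(ng) for ng in counts}
--     # best[sub] = max count over all strictly longer ngrams containing sub contiguously;
--     # only sub-tuple lengths that occur as key lengths can ever be queried
--     best: dict = {}
--     for other, c in counts.items():
--         n = len(other)
--         for length in lengths:
--             if length >= n:
--                 continue
--             for i in range(n - length + 1):
--                 sub = other[i:i + length]
--                 prev = best.get(sub)
--                 if prev is None or c > prev:
--                     best[sub] = c
--     result = []
--     for ngram, count in frequent:
--         m = best.get(ngram)
--         if m is None or count > m:
--             result.append((ngram, count))
--     return result
-- ===== Notes on version B (the rewrite author's own statement) =====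
-- stated objective: alternative
-- what changed: Instead of testing every ngram against every longer ngram (all-pairs subsequence scan), B builds one dictionary mapping each contiguous sub-tuple (of a length that occurs among the ngrams) to the max count of a longer ngram containing it, then decides each ngram with a single lookup.
import Mathlib
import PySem

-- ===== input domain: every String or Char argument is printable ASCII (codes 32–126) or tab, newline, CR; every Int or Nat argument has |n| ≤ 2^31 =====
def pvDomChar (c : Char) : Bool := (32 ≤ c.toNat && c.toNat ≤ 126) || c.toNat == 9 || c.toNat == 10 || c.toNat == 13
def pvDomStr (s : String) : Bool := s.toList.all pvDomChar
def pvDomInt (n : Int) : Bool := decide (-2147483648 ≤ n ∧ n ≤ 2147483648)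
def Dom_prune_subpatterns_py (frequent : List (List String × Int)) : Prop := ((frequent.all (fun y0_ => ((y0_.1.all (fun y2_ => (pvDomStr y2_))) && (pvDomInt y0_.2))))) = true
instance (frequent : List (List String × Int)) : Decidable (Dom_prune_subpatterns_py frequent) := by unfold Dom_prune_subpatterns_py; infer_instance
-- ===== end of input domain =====

-- B replaces A's all-pairs scan (each ngram tested against every longer ngram) by one dict of
-- contiguous sub-tuples → max count of a longer ngram containing it, then a single lookup per
-- ngram; objective: alternative (no pairwise scan; measured cost comparable on generated inputs).

-- ===== PORT A =====
-- _is_subsequence: the for-loop with an early `return True` is ported as List.any over the same range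
def pv_is_subsequence (short long : List String) : Bool :=
  let ls := short.length
  let ll := long.length
  (PySem.List.pyRange 0 ((ll : Int) - (ls : Int) + 1) 1).any
    (fun i => PySem.List.slice long (some i) (some (i + (ls : Int))) == short)

def prune_subpatterns_py (frequent : List (List String × Int)) : List (List String × Int) :=
  let ngram_set := PySem.Set.ofList (frequent.map Prod.fst)
  let counts := PySem.Dict.ofList frequent
  frequent.foldl (fun result p =>
    -- inner `for other in ngram_set` with break: ported as List.any (order-insensitive result);
    -- counts[other]: `other` is always a key of counts, so getD 0 is exact (never the default)
    let dominated := ngram_set.any (fun other =>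
      if other.length ≤ p.1.length then false
      else decide (p.2 ≤ counts.getD other 0) && pv_is_subsequence p.1 other)
    if !dominated then result ++ [p] else result) []

-- ===== PORT B =====
def prune_subpatterns_py_alt (frequent : List (List String × Int)) : List (List String × Int) :=
  let counts := PySem.Dict.ofList frequent
  let lengths : PySem.Set Int := PySem.Set.ofList (counts.keys.map (fun ng => (ng.length : Int)))
  let best : PySem.Dict (List String) Int :=
    counts.items.foldl (fun best oc =>
      let n := oc.1.length
      -- `for length in lengths:` iterates a Python set; the dict built is only looked up
      -- afterwards, so the result does not depend on the iteration order
      lengths.foldl (fun best len =>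
        if len ≥ (n : Int) then best
        else (PySem.List.pyRange 0 ((n : Int) - len + 1) 1).foldl (fun best i =>
          let sub := PySem.List.slice oc.1 (some i) (some (i + len))
          match best.get? sub with
          | none => best.insert sub oc.2
          | some prev => if oc.2 > prev then best.insert sub oc.2 else best) best) best)
      PySem.Dict.empty
  frequent.foldl (fun result p =>
    match best.get? p.1 with
    | none => result ++ [p]
    | some m => if p.2 > m then result ++ [p] else result) []

-- ===== PRECONDITION & SPEC =====
def Spec_prune_subpatterns_py (frequent : List (List String × Int)) (out : List (List String × Int)) : Prop := out = prune_subpatterns_py_alt frequent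
instance (frequent : List (List String × Int)) (out : List (List String × Int)) : Decidable (Spec_prune_subpatterns_py frequent out) := by unfold Spec_prune_subpatterns_py; infer_instance

-- ===== CLAIM (what is proved, stated in full; the proofs are below) =====
def Claim_equal_prune_subpatterns_py : Prop := ∀ (frequent : List (List String × Int)), Dom_prune_subpatterns_py frequent → Spec_prune_subpatterns_py frequent (prune_subpatterns_py frequent)

-- ===== LEMMAS AND PROOFS =====

-- proof-side names for B's pieces
def pvStep (c : Int) (best : PySem.Dict (List String) Int) (sub : List String) : PySem.Dict (List String) Int :=
  match best.get? sub with
  | none => best.insert sub c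
  | some prev => if c > prev then best.insert sub c else best

def pvSubs (lens : List Int) (o : List String) : List (List String) :=
  lens.flatMap (fun len =>
    if len < (o.length : Int) then
      (PySem.List.pyRange 0 ((o.length : Int) - len + 1) 1).map (fun i =>
        PySem.List.slice o (some i) (some (i + len)))
    else [])

def pvLens (frequent : List (List String × Int)) : List Int :=
  PySem.Set.ofList ((PySem.Dict.ofList frequent).keys.map (fun ng => (ng.length : Int)))

def pvBest (frequent : List (List String × Int)) : PySem.Dict (List String) Int :=
  (PySem.Dict.ofList frequent).items.foldl
    (fun b oc => (pvSubs (pvLens frequent) oc.1).foldl (pvStep oc.2) b)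
    PySem.Dict.empty

-- "best has an entry for t that is ≥ w"
def pvLookGE (d : PySem.Dict (List String) Int) (t : List String) (w : Int) : Prop :=
  ∃ v, d.get? t = some v ∧ w ≤ v

lemma pvLookGE_step (best : PySem.Dict (List String) Int) (k : List String) (c : Int)
    (t : List String) (w : Int) :
    pvLookGE (pvStep c best k) t w ↔ pvLookGE best t w ∨ (t = k ∧ w ≤ c) := by
  unfold pvStep pvLookGE
  by_cases ht : t = k
  · subst ht
    cases hg : best.get? t with
    | none => simp [hg, PySem.Dict.get?_insert]
    | some prev =>
      by_cases hc : c > prev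
      · simp [hg, hc, PySem.Dict.get?_insert]; omega
      · simp [hg, hc]; omega
  · cases hg : best.get? k with
    | none => simp [hg, PySem.Dict.get?_insert, ht]
    | some prev =>
      by_cases hc : c > prev
      · simp [hg, hc, PySem.Dict.get?_insert, ht]
      · simp [hg, hc, ht]

lemma pvLookGE_foldl (subs : List (List String)) (c : Int) :
    ∀ (best : PySem.Dict (List String) Int) (t : List String) (w : Int),
    pvLookGE (subs.foldl (pvStep c) best) t w ↔ pvLookGE best t w ∨ (t ∈ subs ∧ w ≤ c) := by
  induction subs with
  | nil => simp
  | cons k rest ih =>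
    intro best t w
    simp only [List.foldl_cons, ih, pvLookGE_step, List.mem_cons]
    tauto

lemma pvLookGE_big (lens : List Int) (items : List (List String × Int)) :
    ∀ (best : PySem.Dict (List String) Int) (t : List String) (w : Int),
    pvLookGE (items.foldl (fun b oc => (pvSubs lens oc.1).foldl (pvStep oc.2) b) best) t w ↔
      pvLookGE best t w ∨ ∃ oc ∈ items, t ∈ pvSubs lens oc.1 ∧ w ≤ oc.2 := by
  induction items with
  | nil => simp
  | cons oc rest ih =>
    intro best t w
    simp only [List.foldl_cons, ih, pvLookGE_foldl, List.mem_cons]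
    constructor
    · rintro ((h | h) | ⟨oc', hm, h1, h2⟩)
      · exact Or.inl h
      · exact Or.inr ⟨oc, Or.inl rfl, h⟩
      · exact Or.inr ⟨oc', Or.inr hm, h1, h2⟩
    · rintro (h | ⟨oc', (rfl | hm), h1, h2⟩)
      · exact Or.inl (Or.inl h)
      · exact Or.inl (Or.inr ⟨h1, h2⟩)
      · exact Or.inr ⟨oc', hm, h1, h2⟩

-- A's membership test, in Nat terms
lemma pv_is_subsequence_iff (t o : List String) :
    pv_is_subsequence t o = true ↔
      ∃ a : Nat, a + t.length ≤ o.length ∧ (o.drop a).take t.length = t := by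
  unfold pv_is_subsequence
  simp only [List.any_eq_true, PySem.List.mem_pyRange_one, beq_iff_eq]
  constructor
  · rintro ⟨i, ⟨hi0, hiu⟩, hs⟩
    refine ⟨i.toNat, by omega, ?_⟩
    rw [show i = ((i.toNat : Nat) : Int) by omega,
      show ((i.toNat : Nat) : Int) + (t.length : Int) = ((i.toNat + t.length : Nat) : Int) by
        push_cast; ring, PySem.List.slice_natCast] at hs
    simpa using hs
  · rintro ⟨a, hle, hs⟩
    refine ⟨(a : Int), ⟨by omega, by omega⟩, ?_⟩
    rw [show (a : Int) + (t.length : Int) = ((a + t.length : Nat) : Int) by push_cast; ring,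
      PySem.List.slice_natCast]
    simpa using hs

lemma mem_pvSubs_iff (lens : List Int) (hnn : ∀ l ∈ lens, 0 ≤ l) (t o : List String) :
    t ∈ pvSubs lens o ↔
      (t.length : Int) ∈ lens ∧ t.length < o.length ∧ pv_is_subsequence t o = true := by
  unfold pvSubs
  simp only [List.mem_flatMap, pv_is_subsequence_iff]
  constructor
  · rintro ⟨len, hmem, hin⟩
    have hlu : len < (o.length : Int) := by
      by_contra hge
      rw [if_neg hge] at hin
      simp at hin
    rw [if_pos hlu] at hin
    simp only [List.mem_map, PySem.List.mem_pyRange_one] at hin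
    obtain ⟨i, ⟨hi0, hiu⟩, hs⟩ := hin
    have hl0 : 0 ≤ len := hnn len hmem
    rw [show i = ((i.toNat : Nat) : Int) by omega,
      show len = ((len.toNat : Nat) : Int) by omega] at hs
    rw [show ((i.toNat : Nat) : Int) + ((len.toNat : Nat) : Int)
        = ((i.toNat + len.toNat : Nat) : Int) by push_cast; ring,
      PySem.List.slice_natCast] at hs
    have htl : t.length = len.toNat := by
      rw [← hs]; simp [List.length_take, List.length_drop]; omega
    refine ⟨by rw [show (t.length : Int) = len by omega]; exact hmem, by omega,
      i.toNat, by omega, ?_⟩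
    rw [htl, ← hs]
    congr 1
    omega
  · rintro ⟨hml, hlt, a, hle, hs⟩
    refine ⟨(t.length : Int), hml, ?_⟩
    rw [if_pos (by omega)]
    simp only [List.mem_map, PySem.List.mem_pyRange_one]
    refine ⟨(a : Int), ⟨by omega, by omega⟩, ?_⟩
    rw [show (a : Int) + (t.length : Int) = ((a + t.length : Nat) : Int) by push_cast; ring,
      PySem.List.slice_natCast]
    simpa using hs

-- keys of dict(frequent) are exactly the firsts of frequent (as a membership set)
lemma mem_keys_foldl_insert (ps : List (List String × Int)) :
    ∀ (d : PySem.Dict (List String) Int) (k : List String),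
    k ∈ (ps.foldl (fun d p => d.insert p.1 p.2) d).keys ↔ k ∈ d.keys ∨ k ∈ ps.map Prod.fst := by
  induction ps with
  | nil => simp
  | cons p rest ih =>
    intro d k
    simp only [List.foldl_cons, ih, PySem.Dict.mem_keys_insert, List.map_cons, List.mem_cons]
    tauto

lemma mem_keys_ofList (ps : List (List String × Int)) (k : List String) :
    k ∈ (PySem.Dict.ofList ps).keys ↔ k ∈ ps.map Prod.fst := by
  rw [show PySem.Dict.ofList ps = ps.foldl (fun d p => d.insert p.1 p.2) PySem.Dict.empty
    from rfl, mem_keys_foldl_insert]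
  have : (PySem.Dict.empty : PySem.Dict (List String) Int).keys = [] := rfl
  simp [this]

-- pvLens facts
lemma pvLens_nonneg (frequent : List (List String × Int)) : ∀ l ∈ pvLens frequent, 0 ≤ l := by
  intro l hl
  rw [pvLens, PySem.Set.mem_ofList] at hl
  obtain ⟨ng, _, rfl⟩ := List.mem_map.1 hl
  positivity

lemma mem_pvLens (frequent : List (List String × Int)) (t : List String)
    (ht : t ∈ frequent.map Prod.fst) : (t.length : Int) ∈ pvLens frequent := by
  rw [pvLens, PySem.Set.mem_ofList]
  exact List.mem_map.2 ⟨t, (mem_keys_ofList frequent t).2 ht, rfl⟩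

-- A's `dominated` flag is exactly "pvBest has an entry ≥ count for the ngram"
lemma dominated_iff (frequent : List (List String × Int)) (p : List String × Int)
    (hp : p.1 ∈ frequent.map Prod.fst) :
    ((PySem.Set.ofList (frequent.map Prod.fst)).any (fun other =>
        if other.length ≤ p.1.length then false
        else decide (p.2 ≤ (PySem.Dict.ofList frequent).getD other 0)
              && pv_is_subsequence p.1 other) = true)
    ↔ pvLookGE (pvBest frequent) p.1 p.2 := by
  rw [pvBest, pvLookGE_big]
  have hnd : (PySem.Dict.ofList frequent).keys.Nodup := PySem.Dict.nodup_keys_ofList frequent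
  have hnn := pvLens_nonneg frequent
  simp only [List.any_eq_true, PySem.Set.mem_ofList]
  constructor
  · rintro ⟨o, ho, hcond⟩
    by_cases hlen : o.length ≤ p.1.length
    · simp [hlen] at hcond
    · simp only [hlen, if_false, Bool.and_eq_true, decide_eq_true_eq] at hcond
      refine Or.inr ⟨(o, (PySem.Dict.ofList frequent).getD o 0), ?_, ?_, hcond.1⟩
      · rw [PySem.Dict.items_eq_map_keys _ hnd 0]
        exact List.mem_map.2 ⟨o, (mem_keys_ofList frequent o).2 ho, rfl⟩
      · exact (mem_pvSubs_iff _ hnn p.1 o).2 ⟨mem_pvLens frequent p.1 hp, by omega, hcond.2⟩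
  · rintro (⟨v, hv, _⟩ | ⟨oc, hm, hsub, hle⟩)
    · rw [show (PySem.Dict.empty : PySem.Dict (List String) Int).get? p.1 = none from rfl] at hv
      cases hv
    · rw [PySem.Dict.items_eq_map_keys _ hnd 0] at hm
      obtain ⟨o, hok, rfl⟩ := List.mem_map.1 hm
      obtain ⟨-, hlt, hss⟩ := (mem_pvSubs_iff _ hnn p.1 o).1 hsub
      refine ⟨o, (mem_keys_ofList frequent o).1 hok, ?_⟩
      simp only [show ¬ (o.length ≤ p.1.length) by omega, if_false, Bool.and_eq_true,
        decide_eq_true_eq]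
      exact ⟨hle, hss⟩

-- B's dict, as written in the port (set of lengths, nested folds), is pvBest
lemma pvBest_eq (frequent : List (List String × Int)) :
    ((PySem.Dict.ofList frequent).items.foldl (fun best oc =>
      (PySem.Set.ofList ((PySem.Dict.ofList frequent).keys.map
          (fun ng => (ng.length : Int)))).foldl (fun best len =>
        if len ≥ (oc.1.length : Int) then best
        else (PySem.List.pyRange 0 ((oc.1.length : Int) - len + 1) 1).foldl (fun best i =>
          match best.get? (PySem.List.slice oc.1 (some i) (some (i + len))) with
          | none => best.insert (PySem.List.slice oc.1 (some i) (some (i + len))) oc.2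
          | some prev => if oc.2 > prev then
              best.insert (PySem.List.slice oc.1 (some i) (some (i + len))) oc.2
            else best) best) best) PySem.Dict.empty)
    = pvBest frequent := by
  unfold pvBest
  congr 1
  funext b oc
  rw [pvSubs, List.foldl_flatMap, ← pvLens]
  congr 1
  funext b' len
  by_cases h : len < (oc.1.length : Int)
  · rw [if_pos h, if_neg (by omega), List.foldl_map]
    rfl
  · rw [if_neg h, if_pos (by omega)]
    rfl

-- ===== VERDICT (by name: the statement is the Claim_ definition above) =====
theorem prune_subpatterns_py_spec : Claim_equal_prune_subpatterns_py := by
  intro frequent _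
  show prune_subpatterns_py frequent = prune_subpatterns_py_alt frequent
  unfold prune_subpatterns_py prune_subpatterns_py_alt
  simp only []
  rw [pvBest_eq frequent]
  apply PySem.List.foldl_congr_mem
  intro acc p hp
  have h := dominated_iff frequent p (List.mem_map.2 ⟨p, hp, rfl⟩)
  cases hg : (pvBest frequent).get? p.1 with
  | none =>
    have hnot : ¬ pvLookGE (pvBest frequent) p.1 p.2 := by
      rintro ⟨v, hv, _⟩; rw [hg] at hv; cases hv
    rw [← h] at hnot
    simp only [hg]
    simp at hnot ⊢
    exact hnot
  | some m =>
    simp only [hg]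
    by_cases hm : m < p.2
    · have hnot : ¬ pvLookGE (pvBest frequent) p.1 p.2 := by
        rintro ⟨v, hv, hle⟩; rw [hg] at hv; cases hv; omega
      rw [← h] at hnot
      simp at hnot ⊢
      simp [hm]
      exact hnot
    · have hyes : pvLookGE (pvBest frequent) p.1 p.2 := ⟨m, hg, by omega⟩
      rw [← h] at hyes
      simp [hm]
      simpa using hyes
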